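-- pv_equiv track=rewrite | github.com/liambakk/prospect-intelligence | src/services/scoring_engine.py | _calculate_tech_modernization_score
-- ===== SOURCE A (Python) =====
-- from typing import Dict, Any, Optional, List
--
-- def _calculate_tech_modernization_score(
--
--     web_data: Optional[Dict],
--     clearbit_data: Optional[Dict]
-- ) -> int:
--     """Calculate score based on technology stack modernization"""
--
--     tech_stack = []
--
--     # Get tech stack from web scraping
--     if web_data and web_data.get("tech_stack_detected"):
--         tech_stack.extend(web_data["tech_stack_detected"])
--
--     # Get tech stack from Clearbit
--     if clearbit_data and clearbit_data.get("tech_stack"):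
--         tech_stack.extend(clearbit_data["tech_stack"])
--
--     # Remove duplicates
--     tech_stack = list(set([t.lower() for t in tech_stack]))
--
--     # Score based on modern tech adoption
--     score = 0
--
--     # Cloud platforms
--     cloud_techs = ["aws", "azure", "gcp", "google cloud", "kubernetes", "docker"]
--     cloud_count = sum(1 for tech in tech_stack if any(c in tech for c in cloud_techs))
--     score += min(cloud_count * 15, 30)
--
--     # Modern languages/frameworks
--     modern_techs = ["react", "vue", "angular", "node", "python", "go", "rust", "typescript"]
--     modern_count = sum(1 for tech in tech_stack if any(m in tech for m in modern_techs))
--     score += min(modern_count * 10, 30)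
--
--     # AI/ML tools
--     ai_techs = ["tensorflow", "pytorch", "scikit", "jupyter", "spark", "databricks"]
--     ai_count = sum(1 for tech in tech_stack if any(a in tech for a in ai_techs))
--     score += min(ai_count * 20, 40)
--
--     return min(score, 100) if tech_stack else 40
-- ===== SOURCE B (Python) =====
-- CLOUD_TECHS = ["aws", "azure", "gcp", "google cloud", "kubernetes", "docker"]
-- MODERN_TECHS = ["react", "vue", "angular", "node", "python", "go", "rust", "typescript"]
-- AI_TECHS = ["tensorflow", "pytorch", "scikit", "jupyter", "spark", "databricks"]
--
--
-- def _matched_count(techs, keywords):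
--     """Keyword-major: union, over all keywords, of the techs containing that keyword."""
--     matched = set()
--     for k in keywords:
--         matched |= {t for t in techs if k in t}
--     return len(matched)
--
--
-- def _calculate_tech_modernization_score(web_data, clearbit_data):
--     tech_stack = []
--     if web_data and web_data.get("tech_stack_detected"):
--         tech_stack.extend(web_data["tech_stack_detected"])
--     if clearbit_data and clearbit_data.get("tech_stack"):
--         tech_stack.extend(clearbit_data["tech_stack"])
--     if not tech_stack:
--         return 40
--     techs = {t.lower() for t in tech_stack}
--     score = (min(15 * _matched_count(techs, CLOUD_TECHS), 30)
--              + min(10 * _matched_count(techs, MODERN_TECHS), 30)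
--              + min(20 * _matched_count(techs, AI_TECHS), 40))
--     return min(score, 100)
-- ===== Notes on version B (the rewrite author's own statement) =====
-- stated objective: alternative
-- what changed: A scans the deduped tech list tech-major, asking for each tech whether any keyword is a substring; B inverts the nesting keyword-major: for each keyword it collects the set of techs containing it and takes the union per category, the category count being the size of that union (correct because a tech matches a category iff it lies in some keyword's match set).
import Mathlib
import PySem

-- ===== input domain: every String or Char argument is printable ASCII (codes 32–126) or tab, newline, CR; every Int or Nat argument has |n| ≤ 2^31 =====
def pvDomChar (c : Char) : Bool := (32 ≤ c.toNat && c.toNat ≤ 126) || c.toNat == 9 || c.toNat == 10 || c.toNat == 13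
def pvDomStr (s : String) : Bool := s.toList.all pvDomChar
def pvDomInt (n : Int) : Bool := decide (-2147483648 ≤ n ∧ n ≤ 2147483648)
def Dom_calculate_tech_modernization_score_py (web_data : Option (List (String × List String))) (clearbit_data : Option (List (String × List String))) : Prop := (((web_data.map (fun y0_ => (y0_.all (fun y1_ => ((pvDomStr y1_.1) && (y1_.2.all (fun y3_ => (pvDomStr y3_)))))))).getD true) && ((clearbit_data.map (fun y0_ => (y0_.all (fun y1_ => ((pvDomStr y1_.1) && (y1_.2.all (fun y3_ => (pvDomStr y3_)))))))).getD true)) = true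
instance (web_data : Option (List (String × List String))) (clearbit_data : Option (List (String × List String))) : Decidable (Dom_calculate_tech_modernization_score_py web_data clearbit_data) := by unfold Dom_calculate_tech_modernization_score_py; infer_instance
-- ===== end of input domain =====

-- B inverts A's tech-major 'any keyword in tech' scans into keyword-major set unions:
-- per keyword it collects the set of matching techs, the category count is the union's size (alternative decomposition, not claimed faster).

-- ===== PORT A =====
-- 'if d and d.get(key): tech_stack.extend(d[key])'
def pvFetchA (d : Option (List (String × List String))) (key : String) : List String :=
  match d with
  | none => []
  | some l =>
      if l = [] then []
      else
        match (PySem.Dict.mk l).get? key with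
        | none => []
        | some v => v

def calculate_tech_modernization_score_py (web_data : Option (List (String × List String))) (clearbit_data : Option (List (String × List String))) : Int :=
  let tech_stack := pvFetchA web_data "tech_stack_detected" ++ pvFetchA clearbit_data "tech_stack"
  -- tech_stack = list(set([t.lower() for t in tech_stack])); the three sums below are order-independent
  let tech_stack := PySem.Set.ofList (tech_stack.map PySem.Str.lower)
  let score : Int := 0
  let cloud_techs : List String := ["aws", "azure", "gcp", "google cloud", "kubernetes", "docker"]
  let cloud_count : Int := tech_stack.foldl (fun acc tech => if cloud_techs.any (fun c => PySem.Str.isIn c tech) then acc + 1 else acc) 0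
  let score := score + min (cloud_count * 15) 30
  let modern_techs : List String := ["react", "vue", "angular", "node", "python", "go", "rust", "typescript"]
  let modern_count : Int := tech_stack.foldl (fun acc tech => if modern_techs.any (fun m => PySem.Str.isIn m tech) then acc + 1 else acc) 0
  let score := score + min (modern_count * 10) 30
  let ai_techs : List String := ["tensorflow", "pytorch", "scikit", "jupyter", "spark", "databricks"]
  let ai_count : Int := tech_stack.foldl (fun acc tech => if ai_techs.any (fun a => PySem.Str.isIn a tech) then acc + 1 else acc) 0
  let score := score + min (ai_count * 20) 40
  if tech_stack = [] then 40 else min score 100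

-- ===== PORT B =====
def altCloudTechs : List String := ["aws", "azure", "gcp", "google cloud", "kubernetes", "docker"]
def altModernTechs : List String := ["react", "vue", "angular", "node", "python", "go", "rust", "typescript"]
def altAiTechs : List String := ["tensorflow", "pytorch", "scikit", "jupyter", "spark", "databricks"]

def altFetch (d : Option (List (String × List String))) (key : String) : List String :=
  match d with
  | none => []
  | some [] => []
  | some l => ((PySem.Dict.mk l).get? key).getD []

-- 'matched = set(); for k in keywords: matched |= {t for t in techs if k in t}; return len(matched)'
-- (techs is a set, so the comprehension {t for t in techs if k in t} is its filter)
def altMatchedCount (techs : PySem.Set String) (keywords : List String) : Int :=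
  (keywords.foldl
      (fun matched k => PySem.Set.union matched (techs.filter (fun t => PySem.Str.isIn k t)))
      PySem.Set.empty).length

def calculate_tech_modernization_score_py_alt (web_data : Option (List (String × List String))) (clearbit_data : Option (List (String × List String))) : Int :=
  let tech_stack := altFetch web_data "tech_stack_detected" ++ altFetch clearbit_data "tech_stack"
  if tech_stack = [] then 40
  else
    let techs : PySem.Set String := PySem.Set.ofList (tech_stack.map PySem.Str.lower)
    let score := min (15 * altMatchedCount techs altCloudTechs) 30
               + min (10 * altMatchedCount techs altModernTechs) 30
               + min (20 * altMatchedCount techs altAiTechs) 40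
    min score 100

-- ===== PRECONDITION & SPEC =====
def Spec_calculate_tech_modernization_score_py (web_data : Option (List (String × List String))) (clearbit_data : Option (List (String × List String))) (out : Int) : Prop := out = calculate_tech_modernization_score_py_alt web_data clearbit_data
instance (web_data : Option (List (String × List String))) (clearbit_data : Option (List (String × List String))) (out : Int) : Decidable (Spec_calculate_tech_modernization_score_py web_data clearbit_data out) := by unfold Spec_calculate_tech_modernization_score_py; infer_instance

-- ===== CLAIM (what is proved, stated in full; the proofs are below) =====
def Claim_equal_calculate_tech_modernization_score_py : Prop := ∀ (web_data : Option (List (String × List String))) (clearbit_data : Option (List (String × List String))), Dom_calculate_tech_modernization_score_py web_data clearbit_data → Spec_calculate_tech_modernization_score_py web_data clearbit_data (calculate_tech_modernization_score_py web_data clearbit_data)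

-- ===== LEMMAS AND PROOFS =====

lemma fetch_eq (d : Option (List (String × List String))) (key : String) :
    pvFetchA d key = altFetch d key := by
  match d with
  | none => rfl
  | some [] => rfl
  | some (p :: l) =>
      simp [pvFetchA, altFetch]
      cases (PySem.Dict.mk (p :: l)).get? key <;> rfl

-- membership in the keyword-major union fold
lemma mem_matched_fold (techs : PySem.Set String) (keys : List String) :
    ∀ (m : PySem.Set String) (t : String),
      t ∈ keys.foldl
        (fun matched k => PySem.Set.union matched (techs.filter (fun s => PySem.Str.isIn k s)))
        m
      ↔ t ∈ m ∨ (t ∈ techs ∧ keys.any (fun k => PySem.Str.isIn k t) = true) := by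
  induction keys with
  | nil => intro m t; simp
  | cons k keys ih =>
      intro m t
      rw [List.foldl_cons, ih]
      simp only [PySem.Set.mem_union, List.mem_filter, List.any_cons, Bool.or_eq_true]
      tauto

-- the union fold keeps the set duplicate-free
lemma nodup_matched_fold (techs : PySem.Set String) (keys : List String) :
    ∀ (m : PySem.Set String), m.Nodup →
      (keys.foldl
        (fun matched k => PySem.Set.union matched (techs.filter (fun s => PySem.Str.isIn k s)))
        m).Nodup := by
  induction keys with
  | nil => intro m hm; exact hm
  | cons k keys ih =>
      intro m hm
      exact ih _ (PySem.Set.nodup_union _ _ hm)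

-- size of the union = count of techs matching some keyword
lemma matchedCount_eq_countP (techs : PySem.Set String) (hn : techs.Nodup) (keys : List String) :
    altMatchedCount techs keys
      = (techs.countP (fun t => keys.any (fun k => PySem.Str.isIn k t)) : Int) := by
  unfold altMatchedCount
  set M := keys.foldl
      (fun matched k => PySem.Set.union matched (techs.filter (fun s => PySem.Str.isIn k s)))
      PySem.Set.empty with hM
  have hperm : M.Perm (techs.filter (fun t => keys.any (fun k => PySem.Str.isIn k t))) := by
    rw [List.perm_ext_iff_of_nodup
        (nodup_matched_fold techs keys PySem.Set.empty List.nodup_nil)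
        (hn.filter _)]
    intro t
    rw [← hM]  -- keep M folded on the left
    rw [hM, mem_matched_fold, List.mem_filter]
    simp [PySem.Set.empty]
  rw [hperm.length_eq]
  simp [List.countP_eq_length_filter]

lemma ofList_eq_nil_iff (xs : List String) : PySem.Set.ofList xs = [] ↔ xs = [] := by
  constructor
  · intro h
    cases xs with
    | nil => rfl
    | cons x l =>
        exfalso
        have : x ∈ PySem.Set.ofList (x :: l) := by
          rw [PySem.Set.mem_ofList]; exact List.mem_cons_self
        simp [h] at this
  · intro h; subst h; rfl

-- ===== VERDICT (by name: the statement is the Claim_ definition above) =====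
theorem calculate_tech_modernization_score_py_spec : Claim_equal_calculate_tech_modernization_score_py := by
  intro web_data clearbit_data _
  unfold Spec_calculate_tech_modernization_score_py
  unfold calculate_tech_modernization_score_py calculate_tech_modernization_score_py_alt
  rw [fetch_eq, fetch_eq]
  set ts := altFetch web_data "tech_stack_detected" ++ altFetch clearbit_data "tech_stack" with hts
  by_cases h : ts = []
  · simp [h]
  · have hset : ¬ PySem.Set.ofList (ts.map PySem.Str.lower) = [] := by
      intro hc; rw [ofList_eq_nil_iff, List.map_eq_nil_iff] at hc; exact h hc
    simp only [h, if_false, hset]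
    rw [PySem.List.foldl_if_add_one, PySem.List.foldl_if_add_one, PySem.List.foldl_if_add_one]
    rw [matchedCount_eq_countP _ (PySem.Set.nodup_ofList _),
        matchedCount_eq_countP _ (PySem.Set.nodup_ofList _),
        matchedCount_eq_countP _ (PySem.Set.nodup_ofList _)]
    simp only [altCloudTechs, altModernTechs, altAiTechs, zero_add]
    ring_nf
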